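-- pv_equiv track=rewrite | github.com/cmgoffena13/pydantic-json-helpers | spec_based.py | _find_common_path_pattern
-- ===== SOURCE A (Python) =====
-- from typing import Any, Callable, Dict, List, Type
--
-- def _find_common_path_pattern(aliases: List[str]) -> str:
--     """Find the common path pattern from a list of alias paths"""
--     if not aliases:
--         return "root"
--
--     # Split all aliases into segments
--     alias_segments = [alias.split(".") for alias in aliases]
--
--     # Find common prefix segments
--     common_segments = []
--     min_length = min(len(segments) for segments in alias_segments)
--
--     for i in range(min_length):
--         # Get all segments at this position
--         segments_at_pos = [segments[i] for segments in alias_segments]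
--
--         # Check if all segments match (accounting for [*] wildcards)
--         first_seg = segments_at_pos[0]
--
--         # Extract base key name (without index)
--         first_base = first_seg.split("[")[0] if "[" in first_seg else first_seg
--
--         # Check if all segments have the same base key
--         all_match = all(
--             seg.split("[")[0] == first_base if "[" in seg else seg == first_base
--             for seg in segments_at_pos
--         )
--
--         if all_match:
--             # Use the first segment (preserves [*] if present)
--             common_segments.append(first_seg)
--         else:
--             # Stop at first non-matching segment
--             break
--
--     return ".".join(common_segments) if common_segments else "root"
-- ===== SOURCE B (Python) =====
-- from typing import List
--
--
-- def _base(seg: str) -> str: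
--     """Base key of a segment: everything before the first '['."""
--     return seg.split("[")[0] if "[" in seg else seg
--
--
-- def _shorten(cand: List[str], segs: List[str]) -> List[str]:
--     """Longest prefix of cand whose base keys match segs position by position."""
--     if cand and segs and _base(cand[0]) == _base(segs[0]):
--         return [cand[0]] + _shorten(cand[1:], segs[1:])
--     return []
--
--
-- def _find_common_path_pattern(aliases: List[str]) -> str:
--     """Find the common path pattern from a list of alias paths"""
--     if not aliases:
--         return "root"
--     cand = aliases[0].split(".")
--     for alias in aliases[1:]:
--         cand = _shorten(cand, alias.split("."))
--     return ".".join(cand) if cand else "root"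
-- ===== Notes on version B (the rewrite author's own statement) =====
-- stated objective: simpler
-- what changed: A scans column-wise: for each position it builds the list of all segments at that position, extracts the first one's base key and checks all of them against it, breaking at the first mismatching column; B instead folds once over the remaining aliases, repeatedly shortening a candidate prefix (seeded from the first alias) to the longest base-key-matching prefix with each alias, with no per-position column lists and no precomputed minimum length.
import Mathlib
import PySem

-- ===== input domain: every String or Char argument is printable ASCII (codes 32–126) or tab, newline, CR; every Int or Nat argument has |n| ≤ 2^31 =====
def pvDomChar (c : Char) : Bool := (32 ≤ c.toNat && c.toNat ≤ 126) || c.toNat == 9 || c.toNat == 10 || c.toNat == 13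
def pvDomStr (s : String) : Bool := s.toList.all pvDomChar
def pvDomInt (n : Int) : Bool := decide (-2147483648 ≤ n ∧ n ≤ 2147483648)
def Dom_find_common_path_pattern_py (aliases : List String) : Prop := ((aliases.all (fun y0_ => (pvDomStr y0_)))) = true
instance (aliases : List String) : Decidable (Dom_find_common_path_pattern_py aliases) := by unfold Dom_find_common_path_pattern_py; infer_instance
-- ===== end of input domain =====

-- B replaces A's column-wise scan (per position, collect all segments, compare bases, break)
-- by a single fold over the remaining aliases that keeps shortening a candidate prefix
-- (no per-position column lists, no precomputed minimum length); objective: simpler.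

-- ===== PORT A =====
-- the 'for i in range(min_length): … else: break' loop of A; acc is common_segments.
-- segs.getD i "" ports segments[i]: i < min_length ≤ len(segments), always in range — exact.
-- segments_at_pos.headD "" ports segments_at_pos[0]: the list is nonempty (aliases ≠ []) — exact.
def pvLoopA (alias_segments : List (List String)) (min_length i : Nat) (acc : List String) : List String :=
  if _h : i < min_length then
    let segments_at_pos := alias_segments.map (fun segs => segs.getD i "")
    let first_seg := segments_at_pos.headD ""
    let first_base := if PySem.Str.isIn "[" first_seg then ((PySem.Str.split? first_seg "[").getD []).headD "" else first_seg
    let all_match := segments_at_pos.all (fun seg =>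
      (if PySem.Str.isIn "[" seg then ((PySem.Str.split? seg "[").getD []).headD "" else seg) == first_base)
    if all_match then pvLoopA alias_segments min_length (i + 1) (acc ++ [first_seg]) else acc
  else acc
termination_by min_length - i

def find_common_path_pattern_py (aliases : List String) : String :=
  if aliases = [] then "root"
  else
    let alias_segments := aliases.map (fun al => (PySem.Str.split? al ".").getD [])   -- sep "." ≠ "": split? is some — exact
    -- min over a NONEMPTY list of lengths: min? is some here; the getD 0 default is unreachable — exact
    let min_length := (PySem.List.min? (alias_segments.map (fun segments => segments.length)) (fun n => n)).getD 0
    let common_segments := pvLoopA alias_segments min_length 0 []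
    if common_segments = [] then "root" else PySem.Str.join "." common_segments

-- ===== PORT B =====
-- base key of a segment: everything before the first '['
def pvBase (seg : String) : String :=
  if PySem.Str.isIn "[" seg then ((PySem.Str.split? seg "[").getD []).headD "" else seg

-- longest prefix of cand whose base keys match segs position by position
def pvShorten : List String → List String → List String
  | c :: cs, s :: ss => if pvBase c == pvBase s then c :: pvShorten cs ss else []
  | _, _ => []

def find_common_path_pattern_py_alt (aliases : List String) : String :=
  match aliases with
  | [] => "root"
  | a :: rest =>
    let cand := rest.foldl (fun cand al => pvShorten cand ((PySem.Str.split? al ".").getD []))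
                  ((PySem.Str.split? a ".").getD [])
    if cand = [] then "root" else PySem.Str.join "." cand

-- ===== PRECONDITION & SPEC =====
def Spec_find_common_path_pattern_py (aliases : List String) (out : String) : Prop := out = find_common_path_pattern_py_alt aliases
instance (aliases : List String) (out : String) : Decidable (Spec_find_common_path_pattern_py aliases out) := by unfold Spec_find_common_path_pattern_py; infer_instance

-- ===== CLAIM (what is proved, stated in full; the proofs are below) =====
def Claim_equal_find_common_path_pattern_py : Prop := ∀ (aliases : List String), Dom_find_common_path_pattern_py aliases → Spec_find_common_path_pattern_py aliases (find_common_path_pattern_py aliases)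

-- ===== LEMMAS AND PROOFS =====

-- length of the base-key-matching common prefix of two segment lists
def pvLcp : List String → List String → Nat
  | c :: cs, s :: ss => if pvBase c == pvBase s then pvLcp cs ss + 1 else 0
  | _, _ => 0

lemma pvShorten_eq_take : ∀ x y : List String, pvShorten x y = x.take (pvLcp x y) := by
  intro x
  induction x with
  | nil => intro y; cases y <;> rfl
  | cons c cs ih =>
    intro y
    cases y with
    | nil => rfl
    | cons s ss =>
      simp only [pvShorten, pvLcp]
      split <;> simp [ih]

lemma pvLcp_le_right : ∀ x y : List String, pvLcp x y ≤ y.length := by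
  intro x
  induction x with
  | nil => intro y; cases y <;> simp [pvLcp]
  | cons c cs ih =>
    intro y
    cases y with
    | nil => simp [pvLcp]
    | cons s ss => simp only [pvLcp]; split <;> simp [Nat.succ_le_succ (ih ss)]

lemma pvLcp_take_left : ∀ (x : List String) (k : Nat) (y : List String),
    pvLcp (x.take k) y = min k (pvLcp x y) := by
  intro x
  induction x with
  | nil => intro k y; cases y <;> simp [pvLcp]
  | cons c cs ih =>
    intro k y
    cases k with
    | zero => cases y <;> simp [pvLcp]
    | succ k =>
      cases y with
      | nil => simp [pvLcp]
      | cons s ss =>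
        simp only [List.take_succ_cons, pvLcp]
        split
        · rw [ih]; omega
        · simp

lemma pvLcp_match : ∀ (x y : List String) (j : Nat), j < pvLcp x y →
    pvBase (x.getD j "") = pvBase (y.getD j "") := by
  intro x
  induction x with
  | nil => intro y j h; cases y <;> simp [pvLcp] at h
  | cons c cs ih =>
    intro y j h
    cases y with
    | nil => simp [pvLcp] at h
    | cons s ss =>
      simp only [pvLcp] at h
      by_cases hb : pvBase c = pvBase s
      · cases j with
        | zero => simpa using hb
        | succ j =>
          simp only [hb, beq_self_eq_true, if_true] at h
          simpa using ih ss j (by omega)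
      · simp [hb] at h

lemma pvLcp_stop : ∀ (x y : List String), pvLcp x y < x.length → pvLcp x y < y.length →
    pvBase (x.getD (pvLcp x y) "") ≠ pvBase (y.getD (pvLcp x y) "") := by
  intro x
  induction x with
  | nil => intro y h1 _; simp at h1
  | cons c cs ih =>
    intro y h1 h2
    cases y with
    | nil => simp at h2
    | cons s ss =>
      simp only [pvLcp, List.length_cons] at h1 h2 ⊢
      by_cases hb : pvBase c = pvBase s
      · simp only [hb, beq_self_eq_true, if_true] at h1 h2 ⊢
        simpa using ih ss (by omega) (by omega)
      · simp only [hb, beq_iff_eq]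
        exact hb

-- generic characterisation of a running foldl-min
lemma pv_foldl_min_le {α : Type} (g : α → Nat) :
    ∀ (xs : List α) (k : Nat), xs.foldl (fun n x => min n (g x)) k ≤ k := by
  intro xs
  induction xs with
  | nil => intro k; simp
  | cons x xs ih =>
    intro k
    refine le_trans (ih _) ?_
    simp

lemma pv_foldl_min_le_mem {α : Type} (g : α → Nat) :
    ∀ (xs : List α) (k : Nat) (x : α), x ∈ xs → xs.foldl (fun n y => min n (g y)) k ≤ g x := by
  intro xs
  induction xs with
  | nil => intro k x hx; simp at hx
  | cons y ys ih =>
    intro k x hx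
    rcases List.mem_cons.mp hx with h | h
    · subst h
      refine le_trans (pv_foldl_min_le g ys _) ?_
      simp
    · exact ih _ x h

lemma pv_foldl_min_eq {α : Type} (g : α → Nat) :
    ∀ (xs : List α) (k : Nat), xs.foldl (fun n x => min n (g x)) k = k ∨
      ∃ x ∈ xs, xs.foldl (fun n y => min n (g y)) k = g x := by
  intro xs
  induction xs with
  | nil => intro k; simp
  | cons y ys ih =>
    intro k
    rcases ih (min k (g y)) with h | ⟨x, hx, h⟩
    · by_cases hk : k ≤ g y
      · left; simpa [Nat.min_eq_left hk] using h
      · right; exact ⟨y, by simp, by simpa [Nat.min_eq_right (by omega : g y ≤ k)] using h⟩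
    · right; exact ⟨x, by simp [hx], h⟩

-- B's fold over segment lists, as a take of the first list
lemma pv_foldB (L0 : List String) : ∀ (Ls : List (List String)) (k : Nat),
    Ls.foldl pvShorten (L0.take k) =
      L0.take (Ls.foldl (fun n ls => min n (pvLcp L0 ls)) k) := by
  intro Ls
  induction Ls with
  | nil => intro k; rfl
  | cons ls Ls ih =>
    intro k
    have hstep : pvShorten (L0.take k) ls = L0.take (min k (pvLcp L0 ls)) := by
      rw [pvShorten_eq_take, pvLcp_take_left, List.take_take]
      congr 1; omega
    simpa [hstep] using ih (min k (pvLcp L0 ls))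

-- the boolean of A's column test at position i, for alias_segments = L0 :: Ls
def pvCol (Ls : List (List String)) (L0 : List String) (i : Nat) : Bool :=
  ((L0 :: Ls).map (fun segs => segs.getD i "")).all (fun seg =>
    (if PySem.Str.isIn "[" seg then ((PySem.Str.split? seg "[").getD []).headD "" else seg)
      == (if PySem.Str.isIn "[" (L0.getD i "") then ((PySem.Str.split? (L0.getD i "") "[").getD []).headD "" else (L0.getD i "")))

lemma pvCol_iff (Ls : List (List String)) (L0 : List String) (i : Nat) :
    pvCol Ls L0 i = true ↔ ∀ ls ∈ Ls, pvBase (ls.getD i "") = pvBase (L0.getD i "") := by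
  simp only [pvCol, List.all_eq_true, List.mem_map, List.mem_cons]
  constructor
  · intro h ls hls
    have := h _ ⟨ls, Or.inr hls, rfl⟩
    simpa [pvBase] using this
  · intro h seg hseg
    obtain ⟨ls, hls, rfl⟩ := hseg
    rcases hls with rfl | hls
    · simp
    · simpa [pvBase] using h ls hls

-- how many columns A's loop accepts from position i on
def pvCnt (Ls : List (List String)) (L0 : List String) (ml i : Nat) : Nat :=
  if _h : i < ml then (if pvCol Ls L0 i then pvCnt Ls L0 ml (i + 1) + 1 else 0) else 0
termination_by ml - i

lemma pvLoopA_unfold (Ls : List (List String)) (L0 : List String) (ml i : Nat) (acc : List String) :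
    pvLoopA (L0 :: Ls) ml i acc =
      if i < ml then
        (if pvCol Ls L0 i then pvLoopA (L0 :: Ls) ml (i + 1) (acc ++ [L0.getD i ""]) else acc)
      else acc := by
  rw [pvLoopA]
  simp only [pvCol, List.map_cons, List.headD_cons, List.all_cons]
  split <;> rfl

lemma pvCnt_unfold (Ls : List (List String)) (L0 : List String) (ml i : Nat) :
    pvCnt Ls L0 ml i =
      if i < ml then (if pvCol Ls L0 i then pvCnt Ls L0 ml (i + 1) + 1 else 0) else 0 := by
  rw [pvCnt]
  split <;> rfl

lemma pvLoopA_eq_cnt (Ls : List (List String)) (L0 : List String) (ml : Nat) (hml : ml ≤ L0.length) :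
    ∀ (n i : Nat) (acc : List String), ml - i ≤ n →
      pvLoopA (L0 :: Ls) ml i acc = acc ++ (L0.drop i).take (pvCnt Ls L0 ml i) := by
  intro n
  induction n with
  | zero =>
    intro i acc h
    rw [pvLoopA_unfold, pvCnt_unfold]
    have : ¬ i < ml := by omega
    simp [this]
  | succ n ih =>
    intro i acc h
    rw [pvLoopA_unfold, pvCnt_unfold]
    by_cases hi : i < ml
    · simp only [hi, if_true]
      by_cases hc : pvCol Ls L0 i
      · simp only [hc, if_true]
        rw [ih (i + 1) _ (by omega)]
        have hlen : i < L0.length := by omega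
        rw [List.drop_eq_getElem_cons hlen, List.take_succ_cons, List.getD_eq_getElem _ _ hlen]
        simp
      · simp [hc]
    · simp [hi]

-- the stop condition at column i (ml = min of all lengths, Ls the non-first segment lists)
def pvP (Ls : List (List String)) (L0 : List String) (ml i : Nat) : Prop :=
  ml ≤ i ∨ ∃ ls ∈ Ls, pvBase (ls.getD i "") ≠ pvBase (L0.getD i "")

lemma pvCnt_least (Ls : List (List String)) (L0 : List String) (ml : Nat) :
    ∀ (n i : Nat), ml - i ≤ n →
      (∀ j, i ≤ j → j < i + pvCnt Ls L0 ml i → ¬ pvP Ls L0 ml j) ∧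
        pvP Ls L0 ml (i + pvCnt Ls L0 ml i) := by
  intro n
  induction n with
  | zero =>
    intro i h
    rw [pvCnt_unfold]
    have hnl : ¬ i < ml := by omega
    rw [if_neg hnl, Nat.add_zero]
    exact ⟨fun j h1 h2 => absurd h2 (by omega), Or.inl (by omega)⟩
  | succ n ih =>
    intro i h
    rw [pvCnt_unfold]
    by_cases hi : i < ml
    · simp only [hi, if_true]
      by_cases hc : pvCol Ls L0 i
      · simp only [hc, if_true]
        obtain ⟨ih1, ih2⟩ := ih (i + 1) (by omega)
        constructor
        · intro j h1 h2
          by_cases hj : j = i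
          · subst hj
            intro hP
            rcases hP with h' | ⟨ls, hls, hne⟩
            · omega
            · exact hne ((pvCol_iff Ls L0 j).mp hc ls hls)
          · exact ih1 j (by omega) (by omega)
        · have heq : i + (pvCnt Ls L0 ml (i + 1) + 1) = (i + 1) + pvCnt Ls L0 ml (i + 1) := by omega
          rw [heq]
          exact ih2
      · rw [if_neg hc, Nat.add_zero]
        refine ⟨fun j h1 h2 => absurd h2 (by omega), ?_⟩
        right
        by_contra hno
        push Not at hno
        have hcol : pvCol Ls L0 i = true :=
          (pvCol_iff Ls L0 i).mpr (fun ls hls => hno ls hls)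
        simp [hcol] at hc
    · rw [if_neg hi, Nat.add_zero]
      exact ⟨fun j h1 h2 => absurd h2 (by omega), Or.inl (by omega)⟩

lemma pv_least_unique (Q : Nat → Prop) (m k : Nat)
    (hm1 : ∀ j < m, ¬ Q j) (hm2 : Q m) (hk1 : ∀ j < k, ¬ Q j) (hk2 : Q k) : m = k := by
  rcases Nat.lt_trichotomy m k with h | h | h
  · exact absurd hm2 (hk1 m h)
  · exact h
  · exact absurd hk2 (hm1 k h)

-- core equality: A's column loop over L0 :: Ls equals B's fold of pvShorten over Ls
lemma pv_core (L0 : List String) (Ls : List (List String)) (ml : Nat)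
    (hml : PySem.List.min? ((L0 :: Ls).map (fun segments => segments.length)) (fun n => n) = some ml) :
    pvLoopA (L0 :: Ls) ml 0 [] = Ls.foldl pvShorten L0 := by
  have hmin := PySem.List.min?_isMin hml
  have hmlL0 : ml ≤ L0.length := by simpa using hmin _ (by simp)
  have hmlLs : ∀ ls ∈ Ls, ml ≤ ls.length := by
    intro ls hls
    simpa using hmin _ (List.mem_map.mpr ⟨ls, List.mem_cons.mpr (Or.inr hls), rfl⟩)
  have hmem := PySem.List.min?_mem hml
  rw [pvLoopA_eq_cnt Ls L0 ml hmlL0 ml 0 [] (by omega)]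
  have hB : Ls.foldl pvShorten L0 =
      L0.take (Ls.foldl (fun n ls => min n (pvLcp L0 ls)) L0.length) := by
    simpa [List.take_length] using pv_foldB L0 Ls L0.length
  rw [hB]
  simp only [List.drop_zero, List.nil_append]
  congr 1
  set K := Ls.foldl (fun n ls => min n (pvLcp L0 ls)) L0.length with hK
  obtain ⟨h1, h2⟩ := pvCnt_least Ls L0 ml ml 0 (by omega)
  simp only [Nat.zero_add] at h1 h2
  have hKlen : K ≤ L0.length := pv_foldl_min_le _ _ _
  have hKlcp : ∀ ls ∈ Ls, K ≤ pvLcp L0 ls := fun ls hls => pv_foldl_min_le_mem _ _ _ ls hls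
  have hKml : K ≤ ml := by
    rcases List.mem_map.mp hmem with ⟨ls, hls, hlen⟩
    rcases List.mem_cons.mp hls with rfl | hls'
    · omega
    · have ha := hKlcp ls hls'
      have hb := pvLcp_le_right L0 ls
      omega
  refine pv_least_unique (pvP Ls L0 ml) _ K (fun j hj => h1 j (by omega) hj) h2 ?_ ?_
  · intro j hj hP
    rcases hP with h' | ⟨ls, hls, hne⟩
    · omega
    · exact hne (pvLcp_match L0 ls j (by have := hKlcp ls hls; omega)).symm
  · rcases pv_foldl_min_eq (pvLcp L0) Ls L0.length with hEq | ⟨ls, hls, hEq⟩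
    · left
      rw [← hK] at hEq
      omega
    · rw [← hK] at hEq
      by_cases hcase : ml ≤ K
      · exact Or.inl hcase
      · right
        refine ⟨ls, hls, ?_⟩
        have hstop := pvLcp_stop L0 ls
          (by have := hmlL0; omega) (by have := hmlLs ls hls; omega)
        rw [← hEq] at hstop
        exact fun h => hstop h.symm

-- the main per-cons equality
lemma pv_main (a : String) (rest : List String) :
    find_common_path_pattern_py (a :: rest) = find_common_path_pattern_py_alt (a :: rest) := by
  have hcons : (a :: rest) ≠ ([] : List String) := by simp
  obtain ⟨ml, hml⟩ : ∃ m, PySem.List.min?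
      ((((a :: rest).map (fun al => (PySem.Str.split? al ".").getD [])).map
        (fun segments => segments.length))) (fun n => n) = some m := by
    cases h : PySem.List.min?
        ((((a :: rest).map (fun al => (PySem.Str.split? al ".").getD [])).map
          (fun segments => segments.length))) (fun n => n) with
    | none => exact absurd ((PySem.List.min?_eq_none_iff _ _).mp h) (by simp)
    | some m => exact ⟨m, rfl⟩
  unfold find_common_path_pattern_py find_common_path_pattern_py_alt
  rw [if_neg hcons]
  simp only [List.map_cons] at hml ⊢
  rw [hml]
  simp only [Option.getD_some]
  rw [← List.foldl_map]
  rw [pv_core ((PySem.Str.split? a ".").getD [])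
      (rest.map (fun al => (PySem.Str.split? al ".").getD [])) ml (by simpa using hml)]

-- ===== VERDICT (by name: the statement is the Claim_ definition above) =====
theorem find_common_path_pattern_py_spec : Claim_equal_find_common_path_pattern_py := by
  intro aliases _
  unfold Spec_find_common_path_pattern_py
  cases aliases with
  | nil => rfl
  | cons a rest => exact pv_main a rest
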